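-- pv_equiv track=rewrite | github.com/third-meow/31-stopwatch | 31_tracker.py | calc_away_time
-- ===== SOURCE A (Python) =====
-- def calc_away_time(now_hours, now_minutes, next_hours, next_minutes):
-- 	away_hours = next_hours - now_hours
-- 	away_minutes = next_minutes - now_minutes
-- 	if away_minutes >= 60:
-- 		away_hours += 1
-- 		away_minutes -= 60
--
-- 	elif away_minutes < 0:
-- 		while away_minutes < 0:
-- 				away_hours -= 1
-- 				away_minutes += 60
-- 	return away_minutes + (away_hours*60)
-- ===== SOURCE B (Python) =====
-- def calc_away_time(now_hours, now_minutes, next_hours, next_minutes):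
-- 	return (next_hours - now_hours) * 60 + (next_minutes - now_minutes)
-- ===== Notes on version B (the rewrite author's own statement) =====
-- stated objective: simpler
-- what changed: A's branch and carry-normalisation while loop are replaced by the single closed-form expression (next_hours-now_hours)*60 + (next_minutes-now_minutes), since every adjustment in A shifts 60 between the two accumulators while preserving their weighted sum.
import Mathlib
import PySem

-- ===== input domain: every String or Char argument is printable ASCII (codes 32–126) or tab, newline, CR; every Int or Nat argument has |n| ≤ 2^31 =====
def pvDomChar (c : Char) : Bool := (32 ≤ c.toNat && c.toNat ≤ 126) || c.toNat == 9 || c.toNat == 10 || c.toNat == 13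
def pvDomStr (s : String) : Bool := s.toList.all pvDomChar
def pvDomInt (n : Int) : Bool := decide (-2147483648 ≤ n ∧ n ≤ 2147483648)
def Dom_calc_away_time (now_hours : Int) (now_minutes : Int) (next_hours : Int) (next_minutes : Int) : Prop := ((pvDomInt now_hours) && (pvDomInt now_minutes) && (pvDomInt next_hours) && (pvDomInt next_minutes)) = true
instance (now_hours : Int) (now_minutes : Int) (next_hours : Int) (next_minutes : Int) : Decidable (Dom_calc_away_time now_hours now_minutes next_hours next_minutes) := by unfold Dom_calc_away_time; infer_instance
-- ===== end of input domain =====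

-- B replaces A's carry-adjustment branches and while loop with one closed-form arithmetic expression (simpler; same value everywhere).


-- ===== PORT A =====
-- while away_minutes < 0: away_hours -= 1; away_minutes += 60   (literal loop)
def pyLoopA (away_hours : Int) (away_minutes : Int) : Int × Int :=
  if h : away_minutes < 0 then
    pyLoopA (away_hours - 1) (away_minutes + 60)
  else
    (away_hours, away_minutes)
termination_by (-away_minutes).toNat
decreasing_by omega

def calc_away_time (now_hours : Int) (now_minutes : Int) (next_hours : Int) (next_minutes : Int) : Int :=
  let away_hours := next_hours - now_hours
  let away_minutes := next_minutes - now_minutes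
  if away_minutes ≥ 60 then
    (away_minutes - 60) + ((away_hours + 1) * 60)
  else if away_minutes < 0 then
    let p := pyLoopA away_hours away_minutes
    p.2 + (p.1 * 60)
  else
    away_minutes + (away_hours * 60)

-- ===== PORT B =====
def calc_away_time_alt (now_hours : Int) (now_minutes : Int) (next_hours : Int) (next_minutes : Int) : Int :=
  (next_hours - now_hours) * 60 + (next_minutes - now_minutes)

-- ===== PRECONDITION & SPEC =====
def Spec_calc_away_time (now_hours : Int) (now_minutes : Int) (next_hours : Int) (next_minutes : Int) (out : Int) : Prop := out = calc_away_time_alt now_hours now_minutes next_hours next_minutes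
instance (now_hours : Int) (now_minutes : Int) (next_hours : Int) (next_minutes : Int) (out : Int) : Decidable (Spec_calc_away_time now_hours now_minutes next_hours next_minutes out) := by unfold Spec_calc_away_time; infer_instance

-- ===== CLAIM (what is proved, stated in full; the proofs are below) =====
def Claim_equal_calc_away_time : Prop := ∀ (now_hours : Int) (now_minutes : Int) (next_hours : Int) (next_minutes : Int), Dom_calc_away_time now_hours now_minutes next_hours next_minutes → Spec_calc_away_time now_hours now_minutes next_hours next_minutes (calc_away_time now_hours now_minutes next_hours next_minutes)

-- ===== LEMMAS AND PROOFS =====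

-- ===== VERDICT (by name: the statement is the Claim_ definition above) =====
-- the loop preserves the weighted sum m + h*60
theorem pyLoopA_sum (h m : Int) : (pyLoopA h m).2 + (pyLoopA h m).1 * 60 = m + h * 60 := by
  induction h, m using pyLoopA.induct with
  | case1 h m hlt ih =>
    rw [pyLoopA, dif_pos hlt]
    omega
  | case2 h m hge =>
    rw [pyLoopA, dif_neg hge]

theorem calc_away_time_spec : Claim_equal_calc_away_time := by
  intro nh nm xh xm _
  unfold Spec_calc_away_time calc_away_time calc_away_time_alt
  simp only
  split_ifs with h1 h2
  · ring
  · rw [pyLoopA_sum]; ring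
  · ring
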